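-- pv_equiv track=rewrite | github.com/DurjaMan27/bridge | bidding.py | is_doubled_against_you
-- ===== SOURCE A (Python) =====
-- def is_doubled_against_you(bid_history, current_team):
--   for i in range(len(bid_history)-1, -1, -1):
--     bid = bid_history[i]
--     if bid in ['Double', 'Redouble']:
--       return (i % 2) != current_team  # doubled by opponent
--     if bid not in ['Pass']:
--       break
--   return False
-- ===== SOURCE B (Python) =====
-- def is_doubled_against_you(bid_history, current_team):
--     last = None
--     for i, bid in enumerate(bid_history):
--         if bid != 'Pass':
--             last = (i, bid)
--     if last is not None and last[1] in ('Double', 'Redouble'):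
--         return (last[0] % 2) != current_team
--     return False
-- ===== Notes on version B (the rewrite author's own statement) =====
-- stated objective: alternative
-- what changed: Backward early-exit index scan replaced by a single forward pass that records the last non-Pass bid with its index and decides once after the loop.
import Mathlib
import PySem

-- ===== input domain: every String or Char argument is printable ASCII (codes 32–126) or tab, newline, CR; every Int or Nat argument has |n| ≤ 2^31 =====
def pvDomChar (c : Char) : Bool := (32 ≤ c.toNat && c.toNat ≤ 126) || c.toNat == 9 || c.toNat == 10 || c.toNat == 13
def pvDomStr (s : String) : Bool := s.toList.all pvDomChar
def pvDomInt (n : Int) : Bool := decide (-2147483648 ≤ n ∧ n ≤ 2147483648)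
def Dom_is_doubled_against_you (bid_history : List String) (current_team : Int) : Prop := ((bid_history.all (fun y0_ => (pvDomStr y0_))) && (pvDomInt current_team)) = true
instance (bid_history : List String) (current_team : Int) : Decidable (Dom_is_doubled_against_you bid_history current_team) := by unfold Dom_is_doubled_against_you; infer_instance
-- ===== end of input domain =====

-- B replaces A's backward early-exit scan by one forward pass recording the last
-- non-Pass bid and its index, deciding once after the loop (alternative decomposition).

-- ===== PORT A =====
-- the descending loop 'for i in range(len(bid_history)-1, -1, -1)' as structural
-- recursion on the Nat i+1 (exact: indices len-1, len-2, …, 0, with early return/break)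
def pvALoop (bid_history : List String) (current_team : Int) : Nat → Bool
  | 0 => false
  | Nat.succ i =>
    let bid := (PySem.List.pyGet? bid_history (i : Int)).getD ""
    if bid = "Double" ∨ bid = "Redouble" then
      decide (((i : Int) % 2) ≠ current_team)
    else if bid ≠ "Pass" then false
    else pvALoop bid_history current_team i

def is_doubled_against_you (bid_history : List String) (current_team : Int) : Bool :=
  pvALoop bid_history current_team bid_history.length

-- ===== PORT B =====
-- the final check after B's forward loop ('last' is None or the last non-Pass (i, bid))
def pvBFinish (current_team : Int) : Option (Int × String) → Bool
  | none => false
  | some (i, b) =>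
    if b = "Double" ∨ b = "Redouble" then decide ((i % 2) ≠ current_team) else false

def is_doubled_against_you_alt (bid_history : List String) (current_team : Int) : Bool :=
  pvBFinish current_team
    ((PySem.List.enumerate bid_history).foldl
      (fun acc p => if p.2 ≠ "Pass" then some p else acc) none)

-- ===== PRECONDITION & SPEC =====
def Spec_is_doubled_against_you (bid_history : List String) (current_team : Int) (out : Bool) : Prop := out = is_doubled_against_you_alt bid_history current_team
instance (bid_history : List String) (current_team : Int) (out : Bool) : Decidable (Spec_is_doubled_against_you bid_history current_team out) := by unfold Spec_is_doubled_against_you; infer_instance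

-- ===== CLAIM (what is proved, stated in full; the proofs are below) =====
def Claim_equal_is_doubled_against_you : Prop := ∀ (bid_history : List String) (current_team : Int), Dom_is_doubled_against_you bid_history current_team → Spec_is_doubled_against_you bid_history current_team (is_doubled_against_you bid_history current_team)

-- ===== LEMMAS AND PROOFS =====

-- ===== VERDICT (by name: the statement is the Claim_ definition above) =====
-- loop invariant: A's descending scan over the first n indices equals B's
-- forward fold over the enumeration of the first n bids, finished by pvBFinish
theorem pvLoop_eq (bid_history : List String) (current_team : Int) (n : Nat)
    (hn : n ≤ bid_history.length) :
    pvALoop bid_history current_team n =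
      pvBFinish current_team
        ((PySem.List.enumerate (bid_history.take n)).foldl
          (fun acc p => if p.2 ≠ "Pass" then some p else acc) none) := by
  induction n with
  | zero => simp [pvALoop, PySem.List.enumerate_nil, pvBFinish]
  | succ i ih =>
    have hi : i < bid_history.length := Nat.lt_of_succ_le hn
    have htake : bid_history.take (i + 1) = bid_history.take i ++ [bid_history[i]] := by
      rw [List.take_add_one]
      simp [List.getElem?_eq_getElem hi]
    have hlen : (bid_history.take i).length = i := List.length_take_of_le (Nat.le_of_lt hi)
    rw [htake, PySem.List.enumerate_append, List.foldl_append]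
    rw [hlen]
    simp only [PySem.List.enumerate_cons, PySem.List.enumerate_nil, List.foldl_cons, List.foldl_nil]
    rw [pvALoop]
    simp only [PySem.List.pyGet?_natCast, List.getElem?_eq_getElem hi, Option.getD_some]
    by_cases hD : bid_history[i] = "Double" ∨ bid_history[i] = "Redouble"
    · have hP : ¬ bid_history[i] = "Pass" := by
        rcases hD with h | h <;> simp [h]
      simp [hD, hP, pvBFinish]
    · by_cases hP : bid_history[i] = "Pass"
      · simp [hP, ih (Nat.le_of_lt hn)]
      · simp [hD, hP, pvBFinish]

theorem is_doubled_against_you_spec : Claim_equal_is_doubled_against_you := by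
  intro bid_history current_team _
  unfold Spec_is_doubled_against_you is_doubled_against_you is_doubled_against_you_alt
  rw [pvLoop_eq bid_history current_team bid_history.length le_rfl, List.take_length]
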